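-- pv_equiv track=rewrite | github.com/jaime-s5/crypto-chart-plotter | grafico.py | _calculo_intervalo_optimo
-- ===== SOURCE A (Python) =====
-- def _calculo_intervalo_optimo(tiempo, datos):
--     """
--     Calcula el intervalo óptimo de un conjunto de datos, usando un
--     tamaño especificado y un rango. Si el parámetro intervalo no está
--     vacío se devuelve.
--
--     :param intervalo:   Intervalo de las velas
--     :type intervalo:    str
--     :param datos:       Contenido de la respuesta en formato JSON
--     :type datos:        list
--     :returns:           int    Intervalo óptimo, si no existe, None
--     """
--     # Intervalo definido por el usuario
--     if (tiempo):
--         return tiempo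
--
--     tamaño_optimo = 500
--
--     # Ordenamos los intervalos por el tamaño de puntos
--     intervalos = {}
--     for intervalo in datos['result']:
--         tamaño = len(datos['result'][intervalo])
--         intervalos[intervalo] = tamaño
--
--     intervalos_ordenados = dict(sorted(intervalos.items(), key=lambda x: x[1]))
--
--     # Buscamos el primer intervalo cuyo número de puntos sea mayor al tamaño optimo
--     for intervalo in intervalos_ordenados:
--         tamaño = intervalos_ordenados[intervalo]
--
--         if tamaño_optimo  < tamaño:
--             return intervalo
--
--     # Si no se encuentra ninguno, y el ultimo no tiene puntos, se devuelve 0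
--     intervalo, tamaño = list(intervalos_ordenados.items())[-1]
--     if tamaño == 0:
--         return None
--
--     return intervalo
-- ===== SOURCE B (Python) =====
-- # Single pass over datos['result'] instead of building a size dict and sorting it.
-- def _calculo_intervalo_optimo(tiempo, datos):
--     if tiempo:
--         return tiempo
--
--     best_over = None       # (intervalo, tamano): minimal tamano > 500, earliest-inserted wins
--     best_max = None        # intervalo with maximal tamano, latest-inserted wins
--     best_max_size = -1
--     for intervalo, puntos in datos['result'].items():
--         n = len(puntos)
--         if n > 500 and (best_over is None or n < best_over[1]):
--             best_over = (intervalo, n)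
--         if n >= best_max_size:
--             best_max, best_max_size = intervalo, n
--
--     if best_over is not None:
--         return best_over[0]
--     if best_max_size == 0:
--         return None
--     return best_max
-- ===== Notes on version B (the rewrite author's own statement) =====
-- stated objective: simpler
-- what changed: Replaces A's build-a-size-dict, stable-sort-by-size and two subsequent scans by a single pass over datos['result'] that tracks the earliest interval with minimal size above 500 and the latest interval with maximal size.
import Mathlib
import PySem

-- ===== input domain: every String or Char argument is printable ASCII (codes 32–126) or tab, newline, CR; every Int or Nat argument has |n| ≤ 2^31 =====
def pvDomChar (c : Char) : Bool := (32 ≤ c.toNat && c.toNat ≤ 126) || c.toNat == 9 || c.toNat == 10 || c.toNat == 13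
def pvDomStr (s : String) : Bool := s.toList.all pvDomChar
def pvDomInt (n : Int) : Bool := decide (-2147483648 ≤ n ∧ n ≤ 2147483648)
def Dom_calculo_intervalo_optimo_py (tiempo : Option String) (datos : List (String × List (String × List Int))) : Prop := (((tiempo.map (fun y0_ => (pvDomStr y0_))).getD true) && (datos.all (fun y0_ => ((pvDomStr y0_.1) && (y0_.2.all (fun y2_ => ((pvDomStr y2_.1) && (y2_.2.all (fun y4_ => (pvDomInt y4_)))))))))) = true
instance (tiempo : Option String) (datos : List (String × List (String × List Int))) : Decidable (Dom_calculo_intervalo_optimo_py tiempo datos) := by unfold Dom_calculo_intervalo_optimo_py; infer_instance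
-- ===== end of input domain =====

-- B replaces A's size-dict build + stable sort + two scans by one pass over datos['result'] (objective: simpler).

-- ===== PORT A =====
-- 'for intervalo in intervalos_ordenados: tamaño = …; if tamaño_optimo < tamaño: return intervalo'
def pyBuscaA (d : PySem.Dict String Int) : List String → Option String
  | [] => none
  | k :: t => if 500 < d.getD k 0 then some k else pyBuscaA d t

-- body of A after the 'if tiempo: return tiempo' guard
def pyCuerpoA (datos : List (String × List (String × List Int))) : Option String :=
  match (PySem.Dict.ofList datos).get? "result" with
  | none => none            -- datos['result'] raises KeyError: excluded by Pre_
  | some res =>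
    let rd := PySem.Dict.ofList res
    let intervalos := rd.keys.foldl (fun d k => d.insert k (((rd.getD k []).length : Int))) PySem.Dict.empty
    let ordenados := PySem.Dict.ofList (PySem.List.sorted intervalos.items (fun x => x.2))
    match pyBuscaA ordenados ordenados.keys with
    | some k => some k
    | none =>
      match PySem.List.pyGet? ordenados.items (-1) with
      | none => none        -- list(…)[-1] raises IndexError: excluded by Pre_
      | some p => if p.2 = 0 then none else some p.1

def calculo_intervalo_optimo_py (tiempo : Option String) (datos : List (String × List (String × List Int))) : Option String :=
  match tiempo with
  | some s => if s.toList.isEmpty then pyCuerpoA datos else some s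
  | none => pyCuerpoA datos

-- ===== PORT B =====
-- the single pass: best_over = earliest minimal size > 500, (best_max, best_max_size) = latest maximal size
def altLoop : List (String × List Int) → Option (String × Int) → Option String → Int →
    Option (String × Int) × Option String × Int
  | [], best_over, best_max, best_max_size => (best_over, best_max, best_max_size)
  | (intervalo, puntos) :: t, best_over, best_max, best_max_size =>
    let n : Int := puntos.length
    altLoop t
      (if decide (500 < n) && (match best_over with | none => true | some q => decide (n < q.2))
       then some (intervalo, n) else best_over)
      (if best_max_size ≤ n then some intervalo else best_max)
      (if best_max_size ≤ n then n else best_max_size)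

-- body of B after the 'if tiempo: return tiempo' guard
def altCuerpo (datos : List (String × List (String × List Int))) : Option String :=
  match (PySem.Dict.ofList datos).get? "result" with
  | none => none            -- datos['result'] raises KeyError, as in A
  | some res =>
    match altLoop (PySem.Dict.ofList res).items none none (-1) with
    | (some q, _, _) => some q.1
    | (none, best_max, best_max_size) => if best_max_size = 0 then none else best_max

def calculo_intervalo_optimo_py_alt (tiempo : Option String) (datos : List (String × List (String × List Int))) : Option String :=
  match tiempo with
  | some s => if s.toList.isEmpty then altCuerpo datos else some s
  | none => altCuerpo datos

-- ===== PRECONDITION & SPEC =====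
-- Pre_ excludes exactly the inputs where Python A raises: tiempo falsy and 'result' missing
-- (KeyError) or tiempo falsy and datos['result'] empty (IndexError at list(...)[-1]).
def Pre_calculo_intervalo_optimo_py (tiempo : Option String) (datos : List (String × List (String × List Int))) : Prop :=
  ((match tiempo with | some s => !s.toList.isEmpty | none => false) ||
   (match (PySem.Dict.ofList datos).get? "result" with | some r => !r.isEmpty | none => false)) = true
instance (tiempo : Option String) (datos : List (String × List (String × List Int))) : Decidable (Pre_calculo_intervalo_optimo_py tiempo datos) := by unfold Pre_calculo_intervalo_optimo_py; infer_instance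

def pvWitness_calculo_intervalo_optimo_py : Option String × (List (String × List (String × List Int))) :=
  (none, [("result", [("1", [1, 2])])])

def Spec_calculo_intervalo_optimo_py (tiempo : Option String) (datos : List (String × List (String × List Int))) (out : Option String) : Prop := out = calculo_intervalo_optimo_py_alt tiempo datos
instance (tiempo : Option String) (datos : List (String × List (String × List Int))) (out : Option String) : Decidable (Spec_calculo_intervalo_optimo_py tiempo datos out) := by unfold Spec_calculo_intervalo_optimo_py; infer_instance

-- ===== CLAIM (what is proved, stated in full; the proofs are below) =====
def Claim_equal_calculo_intervalo_optimo_py : Prop := ∀ (tiempo : Option String) (datos : List (String × List (String × List Int))), Dom_calculo_intervalo_optimo_py tiempo datos → Pre_calculo_intervalo_optimo_py tiempo datos → Spec_calculo_intervalo_optimo_py tiempo datos (calculo_intervalo_optimo_py tiempo datos)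
-- ===== LEMMAS AND PROOFS =====

-- single-pass step of B, on (interval, size) pairs
def bstep (st : Option (String × Int) × Option String × Int) (x : String × Int) :
    Option (String × Int) × Option String × Int :=
  (if decide (500 < x.2) && (match st.1 with | none => true | some q => decide (x.2 < q.2))
   then some x else st.1,
   if st.2.2 ≤ x.2 then some x.1 else st.2.1,
   if st.2.2 ≤ x.2 then x.2 else st.2.2)

theorem altLoop_eq_foldl (l : List (String × List Int)) :
    ∀ st : Option (String × Int) × Option String × Int,
      altLoop l st.1 st.2.1 st.2.2 = (l.map (fun p => (p.1, (p.2.length : Int)))).foldl bstep st := by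
  induction l with
  | nil => intro st; rfl
  | cons h t ih =>
    intro st
    obtain ⟨k, pts⟩ := h
    simp only [altLoop, List.map_cons, List.foldl_cons]
    exact ih (bstep st (k, (pts.length : Int)))

theorem insertBy_ne_nil {α : Type} (before : α → α → Bool) (x : α) (s : List α) :
    PySem.List.insertBy before x s ≠ [] := by
  cases s with
  | nil => simp [PySem.List.insertBy]
  | cons y t => simp only [PySem.List.insertBy]; split <;> simp

theorem find?_insertBy (x : String × Int) (s : List (String × Int)) :
    ((PySem.List.insertBy (fun a b => decide (a.2 < b.2)) x s).find? (fun p => decide (500 < p.2))) =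
      match s.find? (fun p => decide (500 < p.2)) with
      | none => if 500 < x.2 then some x else none
      | some q => if 500 < x.2 ∧ x.2 < q.2 then some x else some q := by
  induction s with
  | nil =>
    simp only [PySem.List.insertBy, List.find?_nil, List.find?_cons]
    by_cases h : 500 < x.2 <;> simp [h]
  | cons y t ih =>
    simp only [PySem.List.insertBy]
    by_cases hxy : x.2 < y.2
    · simp only [hxy, decide_true, if_true]
      by_cases hox : 500 < x.2
      · have hox' : (decide (500 < x.2)) = true := by simpa using hox
        have hoy' : (decide (500 < y.2)) = true := by simpa using lt_trans hox hxy
        have hLx : List.find? (fun p => decide (500 < p.2)) (x :: y :: t) = some x := by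
          rw [List.find?_cons, hox']
        have hRy : List.find? (fun p => decide (500 < p.2)) (y :: t) = some y := by
          rw [List.find?_cons, hoy']
        rw [hLx, hRy]
        simp [hox, hxy]
      · have hox' : (decide (500 < x.2)) = false := by simpa using hox
        have hLx : List.find? (fun p => decide (500 < p.2)) (x :: y :: t) =
            List.find? (fun p => decide (500 < p.2)) (y :: t) := by
          rw [List.find?_cons, hox']
        rw [hLx]
        cases hft : List.find? (fun p => decide (500 < p.2)) (y :: t) with
        | none => simp [hox]
        | some q => simp [hox]
    · have hc : (decide (x.2 < y.2)) = false := by simpa using hxy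
      simp only [hc, Bool.false_eq_true, if_false]
      by_cases hoy : 500 < y.2
      · have hoy' : (decide (500 < y.2)) = true := by simpa using hoy
        have hLy : List.find? (fun p => decide (500 < p.2))
            (y :: PySem.List.insertBy (fun a b => decide (a.2 < b.2)) x t) = some y := by
          rw [List.find?_cons, hoy']
        have hRy : List.find? (fun p => decide (500 < p.2)) (y :: t) = some y := by
          rw [List.find?_cons, hoy']
        rw [hLy, hRy]
        simp [hxy]
      · have hoy' : (decide (500 < y.2)) = false := by simpa using hoy
        have hLy : List.find? (fun p => decide (500 < p.2))
              (y :: PySem.List.insertBy (fun a b => decide (a.2 < b.2)) x t) =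
            List.find? (fun p => decide (500 < p.2))
              (PySem.List.insertBy (fun a b => decide (a.2 < b.2)) x t) := by
          rw [List.find?_cons, hoy']
        have hRy : List.find? (fun p => decide (500 < p.2)) (y :: t) =
            List.find? (fun p => decide (500 < p.2)) t := by
          rw [List.find?_cons, hoy']
        rw [hLy, hRy]
        exact ih

theorem getLast?_insertBy (x : String × Int) (s : List (String × Int))
    (hs : s.Pairwise (fun a b => a.2 ≤ b.2)) :
    (PySem.List.insertBy (fun a b => decide (a.2 < b.2)) x s).getLast? =
      match s.getLast? with
      | none => some x
      | some q => if q.2 ≤ x.2 then some x else some q := by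
  induction s with
  | nil => rfl
  | cons y t ih =>
    simp only [PySem.List.insertBy]
    by_cases hxy : x.2 < y.2
    · simp only [hxy, decide_true, if_true]
      have hql : ∀ q, (y :: t).getLast? = some q → y.2 ≤ q.2 := by
        intro q hq
        have hqmem : q ∈ y :: t := List.mem_of_getLast? hq
        rcases List.mem_cons.mp hqmem with h | h
        · exact le_of_eq (by rw [h])
        · exact (List.pairwise_cons.mp hs).1 q h
      cases hq : (y :: t).getLast? with
      | none => simp at hq
      | some q =>
        have : ¬ q.2 ≤ x.2 := by
          have := hql q hq
          omega
        simp [List.getLast?_cons_cons, hq, this]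
    · have hc : (decide (x.2 < y.2)) = false := by simpa using hxy
      have hne := insertBy_ne_nil (fun a b : String × Int => decide (a.2 < b.2)) x t
      cases hins : PySem.List.insertBy (fun a b : String × Int => decide (a.2 < b.2)) x t with
      | nil => exact absurd hins hne
      | cons w ws =>
        simp only [hc, Bool.false_eq_true, if_false, List.getLast?_cons_cons]
        rw [← hins, ih (List.pairwise_cons.mp hs).2]
        cases t with
        | nil =>
          have hyx : y.2 ≤ x.2 := by omega
          simp [hyx]
        | cons z t' => simp [List.getLast?_cons_cons]

def lastSt (s : List (String × Int)) : Option String × Int :=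
  match s.getLast? with
  | none => (none, -1)
  | some q => (some q.1, q.2)

theorem foldl_bstep_sorted (L : List (String × Int)) (hL : ∀ p ∈ L, 0 ≤ p.2) :
    L.foldl bstep (none, none, -1) =
      ((PySem.List.sorted L (fun p => p.2)).find? (fun p => decide (500 < p.2)),
       lastSt (PySem.List.sorted L (fun p => p.2))) := by
  induction L using List.reverseRecOn with
  | nil => rfl
  | append_singleton l x ih =>
    have hx : 0 ≤ x.2 := hL x (by simp)
    have hl : ∀ p ∈ l, 0 ≤ p.2 := fun p hp => hL p (by simp [hp])
    have hsort : PySem.List.sorted (l ++ [x]) (fun p => p.2) =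
        PySem.List.insertBy (fun a b : String × Int => decide (a.2 < b.2)) x
          (PySem.List.sorted l (fun p => p.2)) := by
      rw [PySem.List.sorted_eq_foldl_insertBy, PySem.List.sorted_eq_foldl_insertBy,
        List.foldl_append]
      rfl
    rw [List.foldl_append, ih hl, hsort]
    set s := PySem.List.sorted l (fun p : String × Int => p.2) with hsdef
    have hpw : s.Pairwise (fun a b => a.2 ≤ b.2) := PySem.List.sorted_pairwise l (fun p => p.2)
    simp only [List.foldl_cons, List.foldl_nil]
    have h1 : (bstep (s.find? (fun p => decide (500 < p.2)), lastSt s) x).1 =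
        (PySem.List.insertBy (fun a b : String × Int => decide (a.2 < b.2)) x s).find?
          (fun p => decide (500 < p.2)) := by
      rw [find?_insertBy]
      cases hfo : s.find? (fun p => decide (500 < p.2)) with
      | none => simp [bstep, hfo]
      | some q =>
        simp only [bstep]
        by_cases h5 : 500 < x.2 <;> by_cases hq : x.2 < q.2 <;> simp [h5, hq]
    have h2 : (bstep (s.find? (fun p => decide (500 < p.2)), lastSt s) x).2 =
        lastSt (PySem.List.insertBy (fun a b : String × Int => decide (a.2 < b.2)) x s) := by
      have hun : ∀ u : List (String × Int), lastSt u =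
          (match u.getLast? with | none => (none, -1) | some q => (some q.1, q.2)) :=
        fun u => rfl
      rw [hun (PySem.List.insertBy (fun a b : String × Int => decide (a.2 < b.2)) x s),
        getLast?_insertBy x s hpw]
      cases hlast : s.getLast? with
      | none =>
        have : (-1 : Int) ≤ x.2 := by omega
        simp [bstep, lastSt, hlast, this]
      | some q =>
        by_cases hqx : q.2 ≤ x.2 <;> simp [bstep, lastSt, hlast, hqx]
    calc bstep (s.find? (fun p => decide (500 < p.2)), lastSt s) x
        = ((bstep (s.find? (fun p => decide (500 < p.2)), lastSt s) x).1,
           (bstep (s.find? (fun p => decide (500 < p.2)), lastSt s) x).2) := rfl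
      _ = _ := by rw [h1, h2]

theorem pyBuscaA_eq (d : PySem.Dict String Int) (ks : List String) :
    pyBuscaA d ks = ks.find? (fun k => decide (500 < d.getD k 0)) := by
  induction ks with
  | nil => rfl
  | cons k t ih =>
    simp only [pyBuscaA, List.find?_cons]
    split_ifs with h
    · simp [h]
    · simp only [show (decide (500 < d.getD k 0)) = false by simpa using h]
      exact ih

theorem find?_congr_mem {α : Type} (l : List α) (p q : α → Bool)
    (h : ∀ a ∈ l, p a = q a) : l.find? p = l.find? q := by
  induction l with
  | nil => rfl
  | cons a t ih =>
    simp only [List.find?_cons, h a (by simp)]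
    split <;> first | rfl | exact ih (fun b hb => h b (by simp [hb]))

theorem pyGet_neg_one {α : Type} (l : List α) : PySem.List.pyGet? l (-1) = l.getLast? := by
  cases l with
  | nil => rfl
  | cons a t =>
    have h1 : ¬ (0 : Int) ≤ -1 := by omega
    have h2 : -(((a :: t).length : Nat) : Int) ≤ -1 := by
      simp only [List.length_cons]
      omega
    have h3 : ((-(-1 : Int)).toNat) = 1 := by norm_num
    simp only [PySem.List.pyGet?, PySem.List.pyIdx?, h1, if_false, h2, if_true, h3,
      Option.bind, List.getLast?_eq_getElem?]

theorem items_ofList_nodup {κ ν : Type} [BEq κ] [LawfulBEq κ] (l : List (κ × ν))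
    (h : (l.map Prod.fst).Nodup) : (PySem.Dict.ofList l).items = l := by
  unfold PySem.Dict.ofList PySem.Dict.update
  have := PySem.Dict.items_foldl_insert_fresh l (fun p => p.1) (fun p => p.2) PySem.Dict.empty
    (fun a _ => PySem.Dict.contains_empty _) h
  simpa using this

theorem cuerpo_eq (datos : List (String × List (String × List Int))) :
    pyCuerpoA datos = altCuerpo datos := by
  unfold pyCuerpoA altCuerpo
  cases hres : (PySem.Dict.ofList datos).get? "result" with
  | none => rfl
  | some res =>
    simp only
    set rd := PySem.Dict.ofList res with hrd
    have hnk : rd.keys.Nodup := PySem.Dict.nodup_keys_ofList res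
    set L : List (String × Int) := rd.items.map (fun p => (p.1, (p.2.length : Int))) with hLdef
    -- the size dict A builds has items L
    have hint : (rd.keys.foldl (fun d k => d.insert k (((rd.getD k []).length : Int)))
        PySem.Dict.empty).items = L := by
      rw [PySem.Dict.items_foldl_insert_fresh rd.keys (fun a => a)
        (fun k => (((rd.getD k []).length : Int))) PySem.Dict.empty
        (fun a _ => PySem.Dict.contains_empty _) (by simpa using hnk)]
      have h0 : (PySem.Dict.empty : PySem.Dict String Int).items = [] := rfl
      rw [h0, List.nil_append]
      rw [show rd.keys = rd.items.map Prod.fst from rfl, List.map_map]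
      apply List.map_congr_left
      intro p hp
      have hg : rd.getD p.1 [] = p.2 :=
        PySem.Dict.getD_of_mem_items rd (by simpa using hp) hnk []
      simp [Function.comp, hg]
    have hLk : (L.map Prod.fst).Nodup := by
      have : L.map Prod.fst = rd.keys := by
        rw [hLdef, List.map_map]; rfl
      rw [this]; exact hnk
    rw [hint]
    set s := PySem.List.sorted L (fun x : String × Int => x.2) with hsdef
    have hsk : (s.map Prod.fst).Nodup :=
      (((PySem.List.sorted_perm L (fun x : String × Int => x.2) false).map Prod.fst).symm).nodup hLk
    have hord : (PySem.Dict.ofList s).items = s := items_ofList_nodup s hsk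
    have hordnk : (PySem.Dict.ofList s).keys.Nodup := PySem.Dict.nodup_keys_ofList s
    have hkeys : (PySem.Dict.ofList s).keys = s.map Prod.fst := by
      show (PySem.Dict.ofList s).items.map _ = _
      rw [hord]
    -- A's search loop = find? over the sorted pair list
    have hbusca : pyBuscaA (PySem.Dict.ofList s) (PySem.Dict.ofList s).keys =
        (s.find? (fun p => decide (500 < p.2))).map Prod.fst := by
      rw [pyBuscaA_eq, hkeys, List.find?_map]
      congr 1
      apply find?_congr_mem
      intro p hp
      have : (PySem.Dict.ofList s).getD p.1 0 = p.2 :=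
        PySem.Dict.getD_of_mem_items _ (by rw [hord]; simpa using hp) hordnk 0
      simp [Function.comp, this]
    -- B's loop = the fold characterised against the sorted list
    have hLpos : ∀ p ∈ L, 0 ≤ p.2 := by
      intro p hp
      rw [hLdef] at hp
      obtain ⟨q, _, rfl⟩ := List.mem_map.mp hp
      exact Int.natCast_nonneg _
    have haltl : altLoop rd.items none none (-1) =
        (s.find? (fun p => decide (500 < p.2)), lastSt s) := by
      have := altLoop_eq_foldl rd.items (none, none, -1)
      simp only at this
      rw [this, ← hLdef, foldl_bstep_sorted L hLpos, ← hsdef]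
    rw [haltl, hord, pyGet_neg_one]
    cases hfo : s.find? (fun p => decide (500 < p.2)) with
    | some q => simp [hbusca, hfo]
    | none =>
      cases hlast : s.getLast? with
      | none => simp [lastSt, hlast, hbusca, hfo]
      | some p => simp [lastSt, hlast, hbusca, hfo]

-- ===== VERDICT (by name: the statement is the Claim_ definition above) =====
theorem calculo_intervalo_optimo_py_spec : Claim_equal_calculo_intervalo_optimo_py := by
  intro tiempo datos _ _
  unfold Spec_calculo_intervalo_optimo_py calculo_intervalo_optimo_py calculo_intervalo_optimo_py_alt
  cases tiempo with
  | none => exact cuerpo_eq datos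
  | some s =>
    by_cases h : s.toList.isEmpty
    · simp only [h, if_true]
      exact cuerpo_eq datos
    · simp [h]
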